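-- pv_equiv track=rewrite | github.com/xurten/coding-interview | python_tests/test_18_order_of_the_list.py | check_list_order
-- ===== SOURCE A (Python) =====
-- def check_list_order(lst):
--     if not lst or len(lst) < 2:
--         return 0
--
--     is_increasing = True
--     is_decreasing = True
--
--     for i in range(1, len(lst)):
--         if lst[i] < lst[i - 1]:
--             is_increasing = False
--         elif lst[i] > lst[i - 1]:
--             is_decreasing = False
--         else:
--             is_increasing = False
--             is_decreasing = False
--
--     if is_increasing:
--         return 1
--     elif is_decreasing:
--         return -1
--     else:
--         return 0
-- ===== SOURCE B (Python) =====
-- def check_list_order(lst):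
--     if len(lst) < 2:
--         return 0
--     if len(set(lst)) != len(lst):
--         return 0
--     if lst == sorted(lst):
--         return 1
--     if lst == sorted(lst, reverse=True):
--         return -1
--     return 0
-- ===== Notes on version B (the rewrite author's own statement) =====
-- stated objective: alternative
-- what changed: Replaces the index loop tracking two monotonicity flags by a sort-then-compare strategy: distinctness via len(set(lst)) plus equality with sorted(lst) / sorted(lst, reverse=True).
import Mathlib
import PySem

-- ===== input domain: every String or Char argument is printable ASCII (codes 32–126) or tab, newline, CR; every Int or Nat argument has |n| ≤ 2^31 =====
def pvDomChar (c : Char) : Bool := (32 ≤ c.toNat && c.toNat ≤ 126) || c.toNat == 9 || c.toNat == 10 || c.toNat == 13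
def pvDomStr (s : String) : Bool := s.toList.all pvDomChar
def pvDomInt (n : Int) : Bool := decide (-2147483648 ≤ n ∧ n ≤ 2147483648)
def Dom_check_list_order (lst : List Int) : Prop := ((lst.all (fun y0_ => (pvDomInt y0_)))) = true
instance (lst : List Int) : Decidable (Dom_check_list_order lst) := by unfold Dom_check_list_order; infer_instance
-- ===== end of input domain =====

-- B replaces A's flag-tracking index loop by a sort-then-compare strategy (same results; not claimed faster).

-- ===== PORT A =====
def check_list_order (lst : List Int) : Int :=
  if lst = [] ∨ lst.length < 2 then 0
  else
    let st := (PySem.List.pyRange 1 (lst.length : Int) 1).foldl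
      (fun (st : Bool × Bool) i =>
        if PySem.List.pyGetD lst i 0 < PySem.List.pyGetD lst (i - 1) 0 then (false, st.2)
        else if PySem.List.pyGetD lst i 0 > PySem.List.pyGetD lst (i - 1) 0 then (st.1, false)
        else (false, false)) (true, true)
    if st.1 then 1 else if st.2 then -1 else 0

-- ===== PORT B =====
def check_list_order_alt (lst : List Int) : Int :=
  if lst.length < 2 then 0
  else if (PySem.Set.ofList lst).length ≠ lst.length then 0
  else if lst = PySem.List.sorted lst (fun x => x) false then 1
  else if lst = PySem.List.sorted lst (fun x => x) true then -1
  else 0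

-- ===== PRECONDITION & SPEC =====
def Spec_check_list_order (lst : List Int) (out : Int) : Prop := out = check_list_order_alt lst
instance (lst : List Int) (out : Int) : Decidable (Spec_check_list_order lst out) := by unfold Spec_check_list_order; infer_instance

-- ===== CLAIM (what is proved, stated in full; the proofs are below) =====
def Claim_equal_check_list_order : Prop := ∀ (lst : List Int), Dom_check_list_order lst → Spec_check_list_order lst (check_list_order lst)

-- ===== LEMMAS AND PROOFS =====

-- The index range 1..len-1, mapped to (lst[i-1], lst[i]) pairs, is exactly zip of lst with its tail.
lemma pv_map_range_zip (lst : List Int) :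
    (PySem.List.pyRange 1 (lst.length : Int) 1).map
      (fun i => (PySem.List.pyGetD lst (i - 1) 0, PySem.List.pyGetD lst i 0))
    = lst.zip lst.tail := by
  apply List.ext_getElem
  · simp [PySem.List.length_pyRange_one]
  · intro k h1 h2
    simp only [List.getElem_map]
    rw [PySem.List.getElem_pyRange_one]
    have hk : k + 1 < lst.length := by
      simp [PySem.List.length_pyRange_one] at h1; omega
    have e1 : (1 : Int) + k - 1 = (k : Int) := by omega
    rw [e1, PySem.List.pyGetD_eq_getElem lst 0 (by positivity) (by omega),
        PySem.List.pyGetD_eq_getElem lst 0 (by positivity) (by omega)]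
    have e2 : ((1 : Int) + k).toNat = k + 1 := by omega
    simp [e2, List.getElem_zip, List.getElem_tail]

-- A's loop body over (prev, cur) pairs computes the two "all adjacent pairs" flags.
lemma pv_foldl_pairs (ps : List (Int × Int)) (s : Bool × Bool) :
    ps.foldl
      (fun (st : Bool × Bool) p =>
        if p.2 < p.1 then (false, st.2)
        else if p.2 > p.1 then (st.1, false)
        else (false, false)) s
    = (s.1 && ps.all (fun p => decide (p.1 < p.2)), s.2 && ps.all (fun p => decide (p.2 < p.1))) := by
  induction ps generalizing s with
  | nil => simp
  | cons p ps ih =>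
    simp only [List.foldl_cons, List.all_cons, ih]
    rcases lt_trichotomy p.2 p.1 with h | h | h
    · simp [h, not_lt.mpr h.le]
    · simp [h]
    · simp [h, not_lt.mpr h.le]

-- "every adjacent pair satisfies r" ↔ IsChain r.
lemma pv_allZip_iff_isChain (r : Int → Int → Prop) [DecidableRel r] (lst : List Int) :
    ((lst.zip lst.tail).all (fun p => decide (r p.1 p.2)) = true) ↔ List.IsChain r lst := by
  induction lst with
  | nil => simp
  | cons x xs ih =>
    cases xs with
    | nil => simp
    | cons y t =>
      simp only [List.tail_cons, List.zip_cons_cons, List.all_cons, Bool.and_eq_true,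
        decide_eq_true_eq, List.isChain_cons_cons]
      exact and_congr Iff.rfl ih

-- A's whole loop equals two Pairwise decisions.
lemma pv_loop_eq (lst : List Int) :
    (PySem.List.pyRange 1 (lst.length : Int) 1).foldl
      (fun (st : Bool × Bool) i =>
        if PySem.List.pyGetD lst i 0 < PySem.List.pyGetD lst (i - 1) 0 then (false, st.2)
        else if PySem.List.pyGetD lst i 0 > PySem.List.pyGetD lst (i - 1) 0 then (st.1, false)
        else (false, false)) (true, true)
    = (decide (lst.Pairwise (· < ·)), decide (lst.Pairwise (fun a b => b < a))) := by
  have hmap := (List.foldl_map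
    (f := fun i : Int => (PySem.List.pyGetD lst (i - 1) 0, PySem.List.pyGetD lst i 0))
    (g := fun (st : Bool × Bool) (p : Int × Int) =>
      if p.2 < p.1 then (false, st.2)
      else if p.2 > p.1 then (st.1, false)
      else (false, false))
    (l := PySem.List.pyRange 1 (lst.length : Int) 1) (init := (true, true))).symm
  rw [show (fun (st : Bool × Bool) (i : Int) =>
        if PySem.List.pyGetD lst i 0 < PySem.List.pyGetD lst (i - 1) 0 then ((false : Bool), st.2)
        else if PySem.List.pyGetD lst i 0 > PySem.List.pyGetD lst (i - 1) 0 then (st.1, (false : Bool))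
        else (false, false))
      = (fun (st : Bool × Bool) (i : Int) =>
        (fun (st : Bool × Bool) (p : Int × Int) =>
          if p.2 < p.1 then ((false : Bool), st.2)
          else if p.2 > p.1 then (st.1, (false : Bool))
          else (false, false)) st
          ((fun i : Int => (PySem.List.pyGetD lst (i - 1) 0, PySem.List.pyGetD lst i 0)) i)) from rfl,
    hmap, pv_map_range_zip, pv_foldl_pairs]
  have hb : ∀ b : Bool, b = decide (b = true) := by decide
  have h1 : ((lst.zip lst.tail).all (fun p => decide (p.1 < p.2)))
      = decide (lst.Pairwise (· < ·)) := by
    rw [hb ((lst.zip lst.tail).all (fun p => decide (p.1 < p.2)))]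
    exact decide_eq_decide.mpr
      ((pv_allZip_iff_isChain (· < ·) lst).trans List.isChain_iff_pairwise)
  have htrans : Trans (fun a b : Int => b < a) (fun a b : Int => b < a) (fun a b : Int => b < a) :=
    ⟨fun h1 h2 => lt_trans h2 h1⟩
  have h2 : ((lst.zip lst.tail).all (fun p => decide (p.2 < p.1)))
      = decide (lst.Pairwise (fun a b => b < a)) := by
    rw [hb ((lst.zip lst.tail).all (fun p => decide (p.2 < p.1)))]
    exact decide_eq_decide.mpr
      ((pv_allZip_iff_isChain (fun a b => b < a) lst).trans
        (@List.isChain_iff_pairwise _ _ _ htrans))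
  rw [h1, h2]
  simp

-- set(lst) and lst built by foldl add, on a nodup list, is the list itself.
lemma pv_foldl_add_nodup (xs : List Int) : ∀ s : List Int, (s ++ xs).Nodup →
    List.foldl PySem.Set.add s xs = s ++ xs := by
  induction xs with
  | nil => intro s _; simp
  | cons x xs ih =>
    intro s hnd
    have hx : ¬ x ∈ s := by
      intro hmem
      have hdisj := (List.nodup_append.mp hnd).2.2
      exact hdisj x hmem x (by simp) rfl
    have : PySem.Set.add s x = s ++ [x] := by
      simp [PySem.Set.add, hx]
    rw [List.foldl_cons, this, ih (s ++ [x]) (by simpa using hnd), List.append_assoc]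
    simp

lemma pv_len_ofList_iff (lst : List Int) :
    (PySem.Set.ofList lst).length = lst.length ↔ lst.Nodup := by
  constructor
  · intro hlen
    have hperm : (PySem.Set.ofList lst).Perm lst.dedup := by
      rw [List.perm_ext_iff_of_nodup (PySem.Set.nodup_ofList lst) lst.nodup_dedup]
      intro a
      rw [PySem.Set.mem_ofList, List.mem_dedup]
    have hd : lst.dedup.length = lst.length := by
      rw [← hperm.length_eq, hlen]
    have : lst.dedup = lst := lst.dedup_sublist.eq_of_length hd
    rw [← List.dedup_eq_self]
    exact this
  · intro hnd
    have : PySem.Set.ofList lst = lst := by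
      have := pv_foldl_add_nodup lst [] (by simpa using hnd)
      simpa [PySem.Set.ofList, PySem.Set.empty] using this
    rw [this]

-- ===== VERDICT (by name: the statement is the Claim_ definition above) =====
theorem check_list_order_spec : Claim_equal_check_list_order := by
  intro lst _
  unfold Spec_check_list_order check_list_order check_list_order_alt
  by_cases hlen : lst.length < 2
  · simp [hlen]
  · have hne : ¬ (lst = [] ∨ lst.length < 2) := by
      rintro (h | h)
      · rw [h] at hlen; simp at hlen
      · exact hlen h
    rw [if_neg hne, if_neg hlen, pv_loop_eq]
    by_cases hnd : lst.Nodup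
    · have hguard : ¬ (PySem.Set.ofList lst).length ≠ lst.length := by
        simpa using (pv_len_ofList_iff lst).mpr hnd
      rw [if_neg hguard]
      have hasc : lst = PySem.List.sorted lst (fun x => x) false ↔ lst.Pairwise (· < ·) := by
        constructor
        · intro h
          have hp := PySem.List.sorted_pairwise lst (fun x => x)
          rw [← h] at hp
          exact (hp.and hnd).imp fun hpair => lt_of_le_of_ne hpair.1 hpair.2
        · intro h
          exact (PySem.List.sorted_eq_self_of_pairwise lst _ (h.imp le_of_lt)).symm
      have hdesc : lst = PySem.List.sorted lst (fun x => x) true ↔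
          lst.Pairwise (fun a b => b < a) := by
        constructor
        · intro h
          have hp := PySem.List.sorted_pairwise_rev lst (fun x => x)
          rw [← h] at hp
          exact (hp.and hnd).imp fun hpair => lt_of_le_of_ne hpair.1 hpair.2.symm
        · intro h
          exact (PySem.List.sorted_rev_eq_self_of_pairwise lst _ (h.imp le_of_lt)).symm
      simp only [hasc, hdesc, decide_eq_true_eq]
    · have hguard : (PySem.Set.ofList lst).length ≠ lst.length := by
        intro h
        exact hnd ((pv_len_ofList_iff lst).mp h)
      rw [if_pos hguard]
      have h1 : ¬ lst.Pairwise (· < ·) := fun h => hnd (h.imp ne_of_lt)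
      have h2 : ¬ lst.Pairwise (fun a b => b < a) := fun h => hnd (h.imp fun hb => (ne_of_lt hb).symm)
      simp [h1, h2]
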